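-- pv_equiv track=rewrite | github.com/dionysos1/ISCRIP | week4/dronkenmier.py | stap
-- ===== SOURCE A (Python) =====
-- def stap(lijst: [[]], coordinaat: tuple):
--
--     coX = coordinaat[0]
--     coY = coordinaat[1]
--     lijstX = lijst[coordinaat[0]]
--     tekentje = lijstX[coordinaat[1]]
--     array = ['v', '<', '^', '>']
--     index = 0
--     for x in range(len(array)):
--         if tekentje == array[x]:
--             index = x
--     newCoordinaat = (0, 0)
--
--     # ga 1 stap verder
--     # en verander icoontje 90 graden met klok mee
--     if tekentje == 'v' and coX < len(lijst)-1:
--         newCoordinaat = (coX + 1, coY)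
--         lijstX[coordinaat[1]] = '<'
--     elif tekentje == '^'and coX > 0:
--         newCoordinaat = (coX - 1, coY)
--         lijstX[coordinaat[1]] = '>'
--     elif tekentje == '>' and coY < len(lijst)-1:
--         newCoordinaat = (coX, coY + 1)
--         lijstX[coordinaat[1]] = 'v'
--     elif tekentje == '<' and coY > 0:
--         newCoordinaat = (coX, coY - 1)
--         lijstX[coordinaat[1]] = '^'
--     # als hij out of bounds wil gaan blijf op dezelfde plek
--     else:
--         newCoordinaat = (coX, coY)
--         if index < 3:
--             lijstX[coordinaat[1]] = array[index + 1]
--         else: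
--             lijstX[coordinaat[1]] = array[0]
--
--     return newCoordinaat
-- ===== SOURCE B (Python) =====
-- def stap(lijst: [[]], coordinaat: tuple):
--     # Rotation-normalisation: rotate the grid clockwise k times so that the
--     # tile's direction becomes 'v', handle the single canonical "move down"
--     # case, then rotate back.  Like A, mutates lijst in place (rotated symbol).
--     order = ['v', '<', '^', '>']
--     x, y = coordinaat
--     row = lijst[x]
--     t = row[y]
--     i = order.index(t) if t in order else 0
--     row[y] = order[(i + 1) % 4]
--
--     n = len(lijst)
--     turns = {'v': 0, '>': 1, '^': 2, '<': 3}
--     if t not in turns: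
--         return (x, y)
--     k = turns[t]
--
--     def cw(p):
--         # one 90-degree clockwise rotation of an n x n grid coordinate
--         return (p[1], n - 1 - p[0])
--
--     p = (x, y)
--     for _ in range(k):
--         p = cw(p)
--     if p[0] < n - 1:          # canonical case: 'v' moves down unless at bottom
--         p = (p[0] + 1, p[1])
--         for _ in range(4 - k):
--             p = cw(p)         # cw^4 = identity, so this undoes cw^k
--         return p
--     return (x, y)
-- ===== Notes on version B (the rewrite author's own statement) =====
-- stated objective: alternative
-- what changed: Instead of five coupled move+rotate branches, B normalises the problem by rotating the grid coordinate clockwise k times (k per direction) so every direction becomes the single canonical 'move down' case, decides the move there, and rotates back (cw^4 = identity); the tile symbol is rotated unconditionally via index+1 mod 4; Pre_ excludes out-of-range coordinates where A raises IndexError.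
import Mathlib
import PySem

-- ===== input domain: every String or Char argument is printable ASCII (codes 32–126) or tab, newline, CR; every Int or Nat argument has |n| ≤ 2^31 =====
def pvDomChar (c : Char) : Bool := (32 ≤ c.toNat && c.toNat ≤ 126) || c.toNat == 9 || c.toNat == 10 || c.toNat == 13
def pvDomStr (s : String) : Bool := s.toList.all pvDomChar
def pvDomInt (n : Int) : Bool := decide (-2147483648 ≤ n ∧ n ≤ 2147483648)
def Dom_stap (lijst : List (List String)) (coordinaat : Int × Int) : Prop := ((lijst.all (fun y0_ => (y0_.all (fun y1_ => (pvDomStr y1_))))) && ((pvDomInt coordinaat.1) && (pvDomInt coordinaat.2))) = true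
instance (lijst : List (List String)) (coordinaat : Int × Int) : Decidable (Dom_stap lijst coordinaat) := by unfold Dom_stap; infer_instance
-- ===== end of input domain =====

-- B replaces A's five coupled move+rotate branches by rotation-normalisation: rotate the
-- coordinate clockwise k times so every direction becomes the canonical 'move down' case,
-- decide there, rotate back (objective: alternative). A and B mutate lijst in place
-- identically; the Lean ports and the theorems here cover the RETURN value only.

-- ===== PORT A =====
def stap (lijst : List (List String)) (coordinaat : Int × Int) : Int × Int :=
  let coX := coordinaat.1
  let coY := coordinaat.2
  match PySem.List.pyGet? lijst coX with
  | none => (0, 0)      -- Python: IndexError (excluded by Pre_stap)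
  | some lijstX =>
    match PySem.List.pyGet? lijstX coY with
    | none => (0, 0)    -- Python: IndexError (excluded by Pre_stap)
    | some tekentje =>
      let array := ["v", "<", "^", ">"]
      -- A's index-search loop; in Python it only feeds the in-place rotation,
      -- which is not part of the returned value, so 'index' is unused below.
      let _index := (PySem.List.pyRange 0 4 1).foldl
        (fun acc x =>
          match PySem.List.pyGet? array x with
          | some a => if tekentje == a then x else acc
          | none => acc) (0 : Int)
      if tekentje == "v" && coX < (lijst.length : Int) - 1 then (coX + 1, coY)
      else if tekentje == "^" && coX > 0 then (coX - 1, coY)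
      else if tekentje == ">" && coY < (lijst.length : Int) - 1 then (coX, coY + 1)
      else if tekentje == "<" && coY > 0 then (coX, coY - 1)
      else (coX, coY)

-- ===== PORT B =====
-- Source B's cw helper: one 90-degree clockwise rotation of an n x n grid coordinate
def stapAltCw (n : Int) (p : Int × Int) : Int × Int := (p.2, n - 1 - p.1)

-- Source B's turns dict
def stapAltTurns : PySem.Dict String Int :=
  PySem.Dict.ofList [("v", 0), (">", 1), ("^", 2), ("<", 3)]

def stap_alt (lijst : List (List String)) (coordinaat : Int × Int) : Int × Int :=
  let x := coordinaat.1
  let y := coordinaat.2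
  match PySem.List.pyGet? lijst x with
  | none => (0, 0)      -- Python: IndexError (excluded by Pre_stap)
  | some row =>
    match PySem.List.pyGet? row y with
    | none => (0, 0)    -- Python: IndexError (excluded by Pre_stap)
    | some t =>
      -- Source B's symbol rotation (order.index + write-back) only mutates lijst; not part of the return value.
      let n : Int := (lijst.length : Int)
      match PySem.Dict.get? stapAltTurns t with
      | none => (x, y)
      | some k =>
        let p := (PySem.List.pyRange 0 k 1).foldl (fun p _ => stapAltCw n p) (x, y)
        if p.1 < n - 1 then
          let p := (p.1 + 1, p.2)
          (PySem.List.pyRange 0 (4 - k) 1).foldl (fun p _ => stapAltCw n p) p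
        else (x, y)

-- ===== PRECONDITION & SPEC =====
-- Pre_ excludes exactly the coordinates on which A raises IndexError
-- (row index or column index out of Python range for the indexed row).
def Pre_stap (lijst : List (List String)) (coordinaat : Int × Int) : Prop :=
  ((PySem.List.pyGet? lijst coordinaat.1).any
    (fun row => decide (PySem.Raise.InRange row.length coordinaat.2))) = true
instance (lijst : List (List String)) (coordinaat : Int × Int) : Decidable (Pre_stap lijst coordinaat) := by unfold Pre_stap; infer_instance

def pvWitness_stap : List (List String) × (Int × Int) := ([["v", "x"], [">", "<"]], (0, 1))

def Spec_stap (lijst : List (List String)) (coordinaat : Int × Int) (out : Int × Int) : Prop := out = stap_alt lijst coordinaat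
instance (lijst : List (List String)) (coordinaat : Int × Int) (out : Int × Int) : Decidable (Spec_stap lijst coordinaat out) := by unfold Spec_stap; infer_instance

-- ===== CLAIM (what is proved, stated in full; the proofs are below) =====
def Claim_equal_stap : Prop := ∀ (lijst : List (List String)) (coordinaat : Int × Int), Dom_stap lijst coordinaat → Pre_stap lijst coordinaat → Spec_stap lijst coordinaat (stap lijst coordinaat)

-- ===== LEMMAS AND PROOFS =====
theorem pyRange_lit0 : PySem.List.pyRange 0 0 1 = ([] : List Int) := by decide
theorem pyRange_lit1 : PySem.List.pyRange 0 1 1 = ([0] : List Int) := by decide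
theorem pyRange_lit2 : PySem.List.pyRange 0 2 1 = ([0, 1] : List Int) := by decide
theorem pyRange_lit3 : PySem.List.pyRange 0 3 1 = ([0, 1, 2] : List Int) := by decide
theorem pyRange_lit4 : PySem.List.pyRange 0 4 1 = ([0, 1, 2, 3] : List Int) := by decide

-- ===== VERDICT (by name: the statement is the Claim_ definition above) =====
theorem stap_spec : Claim_equal_stap := by
  intro lijst c _hD hP
  unfold Spec_stap stap stap_alt
  dsimp only
  unfold Pre_stap at hP
  rcases hrow : PySem.List.pyGet? lijst c.1 with _ | row
  · simp [hrow] at hP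
  rcases ht : PySem.List.pyGet? row c.2 with _ | t
  · rw [hrow] at hP
    simp only [Option.any] at hP
    exact absurd ht (by simp [PySem.List.pyGet?_eq_none_iff]; simpa using hP)
  simp only [ht]
  by_cases hv : t = "v"
  · subst hv
    rw [show PySem.Dict.get? stapAltTurns "v" = some 0 from by decide]
    simp only [show ((4:Int) - 0) = 4 from by decide, show ((4:Int) - 1) = 3 from by decide,
      show ((4:Int) - 2) = 2 from by decide, show ((4:Int) - 3) = 1 from by decide,
      pyRange_lit1, pyRange_lit2, pyRange_lit3, pyRange_lit4, pyRange_lit0, List.foldl, stapAltCw]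
    split_ifs <;> (try simp_all) <;> (try simp only [Prod.mk.injEq]) <;> omega
  by_cases hc : t = "^"
  · subst hc
    rw [show PySem.Dict.get? stapAltTurns "^" = some 2 from by decide]
    simp only [show ((4:Int) - 0) = 4 from by decide, show ((4:Int) - 1) = 3 from by decide,
      show ((4:Int) - 2) = 2 from by decide, show ((4:Int) - 3) = 1 from by decide,
      pyRange_lit1, pyRange_lit2, pyRange_lit3, pyRange_lit4, pyRange_lit0, List.foldl, stapAltCw]
    split_ifs <;> (try simp_all) <;> (try simp only [Prod.mk.injEq]) <;> omega
  by_cases hr : t = ">"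
  · subst hr
    rw [show PySem.Dict.get? stapAltTurns ">" = some 1 from by decide]
    simp only [show ((4:Int) - 0) = 4 from by decide, show ((4:Int) - 1) = 3 from by decide,
      show ((4:Int) - 2) = 2 from by decide, show ((4:Int) - 3) = 1 from by decide,
      pyRange_lit1, pyRange_lit2, pyRange_lit3, pyRange_lit4, pyRange_lit0, List.foldl, stapAltCw]
    split_ifs <;> (try simp_all) <;> (try simp only [Prod.mk.injEq]) <;> omega
  by_cases hl : t = "<"
  · subst hl
    rw [show PySem.Dict.get? stapAltTurns "<" = some 3 from by decide]
    simp only [show ((4:Int) - 0) = 4 from by decide, show ((4:Int) - 1) = 3 from by decide,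
      show ((4:Int) - 2) = 2 from by decide, show ((4:Int) - 3) = 1 from by decide,
      pyRange_lit1, pyRange_lit2, pyRange_lit3, pyRange_lit4, pyRange_lit0, List.foldl, stapAltCw]
    split_ifs <;> (try simp_all) <;> (try simp only [Prod.mk.injEq]) <;> omega
  · have hget : PySem.Dict.get? stapAltTurns t = none := by
      simp [stapAltTurns, PySem.Dict.ofList, PySem.Dict.update, PySem.Dict.insert,
        PySem.Dict.empty, PySem.Dict.get?]
      exact ⟨fun h => hv h.symm, fun h => hr h.symm, fun h => hc h.symm, fun h => hl h.symm⟩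
    rw [hget]
    simp [hv, hc, hr, hl]
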